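-- pv_equiv track=rewrite | github.com/KrisKros123/python-powercalc | powercalc_engine/lut/base.py | nearest_key
-- ===== SOURCE A (Python) =====
-- def nearest_key(sorted_keys: list[int], target: int) -> int:
--     """Return the key from *sorted_keys* nearest to *target*.
--
--     When two keys are equidistant the lower one is preferred (stable
--     behaviour regardless of Python version).
--     """
--     if not sorted_keys:
--         raise ValueError("sorted_keys must not be empty")
--     # Binary-search style: the optimal key is one of the two surrounding
--     # *target* in the sorted list.
--     lo, hi = 0, len(sorted_keys) - 1
--     while lo < hi:
--         mid = (lo + hi) // 2
--         if sorted_keys[mid] < target: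
--             lo = mid + 1
--         else:
--             hi = mid
--     # lo is now the index of the first key >= target.
--     if lo == 0:
--         return sorted_keys[0]
--     # Compare the candidate (sorted_keys[lo]) with its left neighbour.
--     left = sorted_keys[lo - 1]
--     right = sorted_keys[lo]
--     return left if (target - left) <= (right - target) else right
-- ===== SOURCE B (Python) =====
-- def nearest_key(sorted_keys: list[int], target: int) -> int:
--     """Return the key from *sorted_keys* nearest to *target* (lower key wins ties)."""
--     if not sorted_keys:
--         raise ValueError("sorted_keys must not be empty")
--
--     def go(seg, left):
--         # seg: the remaining slice; left: the element just before it, if any.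
--         if len(seg) <= 1:
--             r = seg[0]
--             if left is None or (target - left) > (r - target):
--                 return r
--             return left
--         mid = (len(seg) - 1) // 2
--         if seg[mid] < target:
--             return go(seg[mid + 1:], seg[mid])
--         return go(seg[:mid + 1], left)
--
--     return go(sorted_keys, None)
-- ===== Notes on version B (the rewrite author's own statement) =====
-- stated objective: alternative
-- what changed: The index-based while loop (lo/hi bisection followed by a separate left/right-neighbour comparison) is replaced by a recursive divide-and-conquer over list slices that carries the left-neighbour candidate down the recursion and resolves the comparison at the base case.
import Mathlib
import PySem

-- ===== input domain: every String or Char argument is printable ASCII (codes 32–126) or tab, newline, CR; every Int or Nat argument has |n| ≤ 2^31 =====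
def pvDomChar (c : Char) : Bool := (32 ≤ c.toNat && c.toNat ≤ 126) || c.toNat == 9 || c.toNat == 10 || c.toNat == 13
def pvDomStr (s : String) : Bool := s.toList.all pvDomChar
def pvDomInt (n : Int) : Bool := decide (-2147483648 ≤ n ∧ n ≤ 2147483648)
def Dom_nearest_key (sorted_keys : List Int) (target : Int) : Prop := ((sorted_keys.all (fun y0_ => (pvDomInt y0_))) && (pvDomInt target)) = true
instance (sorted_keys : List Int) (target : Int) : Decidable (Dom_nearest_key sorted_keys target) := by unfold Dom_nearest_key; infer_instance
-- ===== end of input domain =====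

-- B replaces A's index-based while loop (bisection on lo/hi plus a final
-- neighbour comparison) by a recursive descent over list slices that carries
-- the left-neighbour candidate (objective: alternative decomposition).

-- ===== PORT A =====
-- the 'while lo < hi' loop of A; indices are always in range on the admitted
-- inputs, so Python's sorted_keys[mid] is ported as getD (exact in range)
def pvBsLoop (keys : List Int) (target : Int) (lo hi : Nat) : Nat :=
  if lo < hi then
    let mid := (lo + hi) / 2
    if keys.getD mid 0 < target then pvBsLoop keys target (mid + 1) hi
    else pvBsLoop keys target lo mid
  else lo
termination_by hi - lo
decreasing_by all_goals omega

def nearest_key (sorted_keys : List Int) (target : Int) : Int :=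
  match sorted_keys with
  | [] => 0  -- Python raises ValueError here; excluded by Pre_nearest_key
  | _ :: _ =>
    let lo := pvBsLoop sorted_keys target 0 (sorted_keys.length - 1)
    if lo = 0 then sorted_keys.getD 0 0
    else
      let left := sorted_keys.getD (lo - 1) 0
      let right := sorted_keys.getD lo 0
      if target - left ≤ right - target then left else right

-- ===== PORT B =====
-- Source B's recursive helper go(seg, left); seg is never empty when reached from
-- a nonempty list, so Python's seg[0] is ported as getD (exact there); the
-- nonnegative slices seg[mid+1:] / seg[:mid+1] are ported as drop / take (exact
-- for in-range nonnegative bounds)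
def pvGo (target : Int) (seg : List Int) (left : Option Int) : Int :=
  if seg.length ≤ 1 then
    let r := seg.getD 0 0
    match left with
    | none => r
    | some l => if target - l > r - target then r else l
  else
    let mid := (seg.length - 1) / 2
    if seg.getD mid 0 < target then pvGo target (seg.drop (mid + 1)) (some (seg.getD mid 0))
    else pvGo target (seg.take (mid + 1)) left
termination_by seg.length
decreasing_by all_goals (simp only [List.length_drop, List.length_take]; omega)

def nearest_key_alt (sorted_keys : List Int) (target : Int) : Int :=
  match sorted_keys with
  | [] => 0  -- Python raises ValueError here; excluded by Pre_nearest_key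
  | _ :: _ => pvGo target sorted_keys none

-- ===== PRECONDITION & SPEC =====
-- Pre_ excludes exactly the empty list, on which A raises ValueError
def Pre_nearest_key (sorted_keys : List Int) (target : Int) : Prop :=
  sorted_keys ≠ []
instance (sorted_keys : List Int) (target : Int) : Decidable (Pre_nearest_key sorted_keys target) := by unfold Pre_nearest_key; infer_instance

def pvWitness_nearest_key : List Int × Int := ([1, 5, 9], 4)

def Spec_nearest_key (sorted_keys : List Int) (target : Int) (out : Int) : Prop := out = nearest_key_alt sorted_keys target
instance (sorted_keys : List Int) (target : Int) (out : Int) : Decidable (Spec_nearest_key sorted_keys target out) := by unfold Spec_nearest_key; infer_instance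

-- ===== CLAIM (what is proved, stated in full; the proofs are below) =====
def Claim_equal_nearest_key : Prop := ∀ (sorted_keys : List Int) (target : Int), Dom_nearest_key sorted_keys target → Pre_nearest_key sorted_keys target → Spec_nearest_key sorted_keys target (nearest_key sorted_keys target)

-- ===== LEMMAS AND PROOFS =====

theorem pv_seg_len (keys : List Int) (lo k : Nat) (h : lo + k ≤ keys.length) :
    ((keys.drop lo).take k).length = k := by
  simp only [List.length_take, List.length_drop]
  omega

theorem pv_seg_getD (keys : List Int) (lo k i : Nat) (h : i < k) (h2 : lo + i < keys.length) :
    ((keys.drop lo).take k).getD i 0 = keys.getD (lo + i) 0 := by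
  have hlen : i < ((keys.drop lo).take k).length := by
    simp only [List.length_take, List.length_drop]; omega
  rw [List.getD_eq_getElem _ 0 hlen, List.getD_eq_getElem _ 0 h2]
  simp [List.getElem_take, List.getElem_drop]

theorem pv_seg_drop (keys : List Int) (lo k j : Nat) :
    ((keys.drop lo).take k).drop j = (keys.drop (lo + j)).take (k - j) := by
  rw [List.drop_take, List.drop_drop]

theorem pv_seg_take (keys : List Int) (lo k j : Nat) (h : j ≤ k) :
    ((keys.drop lo).take k).take j = (keys.drop lo).take j := by
  rw [List.take_take, min_eq_left h]

-- B's recursion on the slice keys[lo..hi] (with its left neighbour) computes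
-- exactly what A's loop followed by A's final comparison computes
theorem pvGo_eq (keys : List Int) (t : Int) : ∀ lo hi, lo ≤ hi → hi < keys.length →
    pvGo t ((keys.drop lo).take (hi - lo + 1))
      (if lo = 0 then none else some (keys.getD (lo - 1) 0)) =
    (if pvBsLoop keys t lo hi = 0 then keys.getD 0 0
     else if t - keys.getD (pvBsLoop keys t lo hi - 1) 0 ≤ keys.getD (pvBsLoop keys t lo hi) 0 - t
       then keys.getD (pvBsLoop keys t lo hi - 1) 0
       else keys.getD (pvBsLoop keys t lo hi) 0) := by
  intro lo hi
  fun_induction pvBsLoop keys t lo hi with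
  | case1 lo hi h mid hmid ih =>
    intro hle hn
    have hmlo : lo ≤ mid := by omega
    have hmhi : mid < hi := by omega
    have hlen : ((keys.drop lo).take (hi - lo + 1)).length = hi - lo + 1 :=
      pv_seg_len keys lo (hi - lo + 1) (by omega)
    rw [pvGo, if_neg (by omega : ¬ ((keys.drop lo).take (hi - lo + 1)).length ≤ 1)]
    simp only [hlen]
    have hmr : (hi - lo + 1 - 1) / 2 = mid - lo := by omega
    rw [hmr]
    rw [pv_seg_getD keys lo (hi - lo + 1) (mid - lo) (by omega) (by omega)]
    have hml : lo + (mid - lo) = mid := by omega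
    rw [hml]
    rw [if_pos (by simpa using hmid)]
    rw [pv_seg_drop]
    have h1 : lo + (mid - lo + 1) = mid + 1 := by omega
    have h2 : hi - lo + 1 - (mid - lo + 1) = hi - (mid + 1) + 1 := by omega
    rw [h1, h2]
    have h3 : (if mid + 1 = 0 then none else some (keys.getD (mid + 1 - 1) 0)) =
        some (keys.getD mid 0) := by simp
    rw [← h3]
    exact ih (by omega) hn
  | case2 lo hi h mid hmid ih =>
    intro hle hn
    have hmlo : lo ≤ mid := by omega
    have hmhi : mid < hi := by omega
    have hlen : ((keys.drop lo).take (hi - lo + 1)).length = hi - lo + 1 :=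
      pv_seg_len keys lo (hi - lo + 1) (by omega)
    rw [pvGo, if_neg (by omega : ¬ ((keys.drop lo).take (hi - lo + 1)).length ≤ 1)]
    simp only [hlen]
    have hmr : (hi - lo + 1 - 1) / 2 = mid - lo := by omega
    rw [hmr]
    rw [pv_seg_getD keys lo (hi - lo + 1) (mid - lo) (by omega) (by omega)]
    have hml : lo + (mid - lo) = mid := by omega
    rw [hml]
    rw [if_neg (by simpa using hmid)]
    rw [pv_seg_take keys lo (hi - lo + 1) (mid - lo + 1) (by omega)]
    exact ih (by omega) (by omega)
  | case3 lo hi h =>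
    intro hle hn
    have heq : lo = hi := by omega
    subst heq
    rw [show lo - lo + 1 = 1 from by omega]
    have hlen : ((keys.drop lo).take 1).length = 1 :=
      pv_seg_len keys lo 1 (by omega)
    rw [pvGo, if_pos (by omega : ((keys.drop lo).take 1).length ≤ 1)]
    have hg : ((keys.drop lo).take 1).getD 0 0 = keys.getD lo 0 := by
      have h0 := pv_seg_getD keys lo 1 0 (by omega) (by omega)
      simp only [Nat.add_zero] at h0
      exact h0
    by_cases hlo : lo = 0
    · subst hlo
      simp only [if_pos rfl]
      simp [hg]
    · rw [if_neg hlo, if_neg hlo]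
      simp only [hg]
      by_cases hc : t - keys.getD (lo - 1) 0 ≤ keys.getD lo 0 - t
      · rw [if_pos hc, if_neg (by omega : ¬ t - keys.getD (lo - 1) 0 > keys.getD lo 0 - t)]
      · rw [if_neg hc, if_pos (by omega : t - keys.getD (lo - 1) 0 > keys.getD lo 0 - t)]

-- ===== VERDICT (by name: the statement is the Claim_ definition above) =====
theorem nearest_key_spec : Claim_equal_nearest_key := by
  intro keys t _ hpre
  obtain ⟨a, xs, rfl⟩ := List.exists_cons_of_ne_nil hpre
  unfold Spec_nearest_key
  have h := pvGo_eq (a :: xs) t 0 ((a :: xs).length - 1) (by omega) (by simp)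
  have hseg : (((a :: xs).drop 0).take ((a :: xs).length - 1 - 0 + 1)) = a :: xs := by
    simp
  rw [hseg, if_pos rfl] at h
  have hA : nearest_key (a :: xs) t =
      (if pvBsLoop (a :: xs) t 0 ((a :: xs).length - 1) = 0 then (a :: xs).getD 0 0
       else if t - (a :: xs).getD (pvBsLoop (a :: xs) t 0 ((a :: xs).length - 1) - 1) 0 ≤
            (a :: xs).getD (pvBsLoop (a :: xs) t 0 ((a :: xs).length - 1)) 0 - t
         then (a :: xs).getD (pvBsLoop (a :: xs) t 0 ((a :: xs).length - 1) - 1) 0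
         else (a :: xs).getD (pvBsLoop (a :: xs) t 0 ((a :: xs).length - 1)) 0) := rfl
  have hB : nearest_key_alt (a :: xs) t = pvGo t (a :: xs) none := rfl
  rw [hA, hB, ← h]
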